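-- pv_equiv track=rewrite | github.com/steckoverflow/advent-2022 | 6.py | solve
-- ===== SOURCE A (Python) =====
-- def solve(d, n):
--     total = 0
--     for row in d:
--         for i in range(n, len(row)):
--             m = row[i - n : i]
--             l = len(set(m))
--             if l == n:
--                 total += i
--                 break
--     return total
-- ===== SOURCE B (Python) =====
-- def solve(d, n):
--     total = 0
--     for row in d:
--         last = {}
--         start = 0
--         for i, c in enumerate(row):
--             if i - start >= n:
--                 total += i
--                 break
--             p = last.get(c, -1)
--             if p >= start:
--                 start = p + 1
--             last[c] = i
--     return total
-- ===== Notes on version B (the rewrite author's own statement) =====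
-- stated objective: alternative
-- what changed: Replaced the per-position slice-and-set distinctness test by a single left-to-right sliding-window scan per row that maintains a last-seen-index dict and the minimal duplicate-free window start, processing each character once.
import Mathlib
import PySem

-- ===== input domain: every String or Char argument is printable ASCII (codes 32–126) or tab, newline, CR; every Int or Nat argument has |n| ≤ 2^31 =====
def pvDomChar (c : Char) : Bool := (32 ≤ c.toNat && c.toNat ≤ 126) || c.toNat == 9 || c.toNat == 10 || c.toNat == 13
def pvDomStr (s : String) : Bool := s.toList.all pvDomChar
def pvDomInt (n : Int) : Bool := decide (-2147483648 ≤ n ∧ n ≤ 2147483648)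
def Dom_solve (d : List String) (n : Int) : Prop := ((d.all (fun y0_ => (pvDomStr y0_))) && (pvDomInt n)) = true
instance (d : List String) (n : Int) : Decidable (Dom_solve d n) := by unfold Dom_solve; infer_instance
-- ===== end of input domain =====

-- B replaces A's per-index slice + set rebuild by a one-pass sliding window per row
-- (last-seen dict, minimal distinct-window start); same candidate indices, same value.

-- ===== PORT A =====
-- inner 'for i in range(n, len(row))' loop with its break: first i whose window is all-distinct (contributes i), else 0
def solveRowA (cs : List Char) (n : Int) : List Int → Int
  | [] => 0
  | i :: rest =>
      -- m = row[i-n:i]; l = len(set(m))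
      if ((PySem.Set.ofList (PySem.List.slice cs (some (i - n)) (some i))).length : Int) = n
      then i else solveRowA cs n rest

def solve (d : List String) (n : Int) : Int :=
  d.foldl (fun total row =>
    total + solveRowA row.toList n (PySem.List.pyRange n (PySem.Str.len row) 1)) 0

-- ===== PORT B =====
-- inner 'for i, c in enumerate(row)' loop of Source B, state (last, start, i); break contributes i
def solveRowB (n : Int) : List Char → PySem.Dict Char Int → Int → Int → Int
  | [], _, _, _ => 0
  | c :: rest, last, start, i =>
      if i - start ≥ n then i
      else -- p = last.get(c, -1); start = p + 1 if p >= start else start; last[c] = i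
        solveRowB n rest (last.insert c i)
          (if last.getD c (-1) ≥ start then last.getD c (-1) + 1 else start) (i + 1)

def solve_alt (d : List String) (n : Int) : Int :=
  d.foldl (fun total row => total + solveRowB n row.toList PySem.Dict.empty 0 0) 0

-- ===== PRECONDITION & SPEC =====
def Spec_solve (d : List String) (n : Int) (out : Int) : Prop := out = solve_alt d n
instance (d : List String) (n : Int) (out : Int) : Decidable (Spec_solve d n out) := by unfold Spec_solve; infer_instance

-- ===== CLAIM (what is proved, stated in full; the proofs are below) =====
def Claim_equal_solve : Prop := ∀ (d : List String) (n : Int), Dom_solve d n → Spec_solve d n (solve d n)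

-- ===== LEMMAS AND PROOFS =====

-- minimal s such that the window cs[s:k] has no duplicate (B's 'start' invariant)
theorem minStart_exists (cs : List Char) (k : Nat) : ∃ s, ((cs.take k).drop s).Nodup :=
  ⟨k, by simp⟩

def minStart (cs : List Char) (k : Nat) : Nat :=
  Nat.find (p := fun s => ((cs.take k).drop s).Nodup) (minStart_exists cs k)

-- index of the last occurrence of c in cs[:k], or -1 (B's dict invariant)
def lastIdx (cs : List Char) (c : Char) : Nat → Int
  | 0 => -1
  | k+1 => if cs[k]? = some c then (k : Int) else lastIdx cs c k

-- the common reference scan: first k < |cs| with k ≥ N and cs[k-N:k] duplicate-free, else 0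
def scanSpec (cs : List Char) (N : Nat) (k : Nat) : Int :=
  if k < cs.length then
    if N ≤ k ∧ ((cs.take k).drop (k - N)).Nodup then (k : Int) else scanSpec cs N (k+1)
  else 0
termination_by cs.length - k
decreasing_by omega

theorem winP_mono (cs : List Char) (k : Nat) {s t : Nat} (h : s ≤ t)
    (hp : ((cs.take k).drop s).Nodup) : ((cs.take k).drop t).Nodup :=
  hp.sublist (List.drop_sublist_drop_left _ h)

theorem minStart_spec (cs : List Char) (k : Nat) : ((cs.take k).drop (minStart cs k)).Nodup := by
  unfold minStart; exact Nat.find_spec (p := fun s => ((cs.take k).drop s).Nodup) (minStart_exists cs k)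

theorem minStart_le_iff (cs : List Char) (k s : Nat) :
    minStart cs k ≤ s ↔ ((cs.take k).drop s).Nodup := by
  constructor
  · intro h; exact winP_mono cs k h (minStart_spec cs k)
  · intro h; unfold minStart; exact Nat.find_min' (p := fun t => ((cs.take k).drop t).Nodup) (minStart_exists cs k) h

theorem minStart_le_self (cs : List Char) (k : Nat) : minStart cs k ≤ k :=
  (minStart_le_iff cs k k).mpr (by simp)

theorem lastIdx_lt (cs : List Char) (c : Char) : ∀ k : Nat, lastIdx cs c k < (k : Int) ∧ -1 ≤ lastIdx cs c k := by
  intro k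
  induction k with
  | zero => simp [lastIdx]
  | succ k ih =>
      rw [lastIdx]
      split
      · constructor <;> omega
      · constructor <;> omega

theorem le_lastIdx_iff (cs : List Char) (c : Char) :
    ∀ k s : Nat, ((s : Int) ≤ lastIdx cs c k) ↔ c ∈ (cs.take k).drop s := by
  intro k
  induction k with
  | zero => intro s; simp [lastIdx]; omega
  | succ k ih =>
      intro s
      rw [lastIdx]
      by_cases hk : k < cs.length
      · have htake : cs.take (k+1) = cs.take k ++ [cs[k]] := List.take_succ_eq_append_getElem hk
        by_cases hs : s ≤ k
        · have hlen : s ≤ (cs.take k).length := by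
            rw [List.length_take]; omega
          rw [htake, List.drop_append_of_le_length hlen]
          rw [List.getElem?_eq_getElem hk]
          by_cases hc : cs[k] = c
          · rw [if_pos (congrArg some hc)]
            simp [hc]
            omega
          · rw [if_neg (fun h => hc (Option.some.inj h))]
            simp only [List.mem_append, List.mem_singleton]
            constructor
            · intro h; exact Or.inl ((ih s).mp h)
            · rintro (h | h)
              · exact (ih s).mpr h
              · exact absurd h.symm hc
        · -- s ≥ k+1 : window empty, and lastIdx < k+1 ≤ s
          have hdrop : (cs.take (k+1)).drop s = [] := by
            apply List.drop_eq_nil_of_le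
            rw [List.length_take]; omega
          rw [hdrop]
          have hlt := lastIdx_lt cs c k
          constructor
          · intro h
            exfalso
            split at h <;> omega
          · intro h; simp at h
      · -- k ≥ length : cs[k]? = none, take (k+1) = take k = cs
        have h1 : cs[k]? = none := by
          rw [List.getElem?_eq_none_iff]; omega
        rw [if_neg (by simp [h1])]
        have ht : cs.take (k+1) = cs.take k := by
          rw [List.take_of_length_le (by omega), List.take_of_length_le (by omega)]
        rw [ht]
        exact ih s

theorem minStart_succ (cs : List Char) (k : Nat) (h : k < cs.length) :
    minStart cs (k+1) = max (minStart cs k) (lastIdx cs cs[k] k + 1).toNat := by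
  have hlt := lastIdx_lt cs cs[k] k
  have key : ∀ s : Nat, ((cs.take (k+1)).drop s).Nodup ↔
      (minStart cs k ≤ s ∧ lastIdx cs cs[k] k < (s : Int)) := by
    intro s
    by_cases hs : s ≤ k
    · have htake : cs.take (k+1) = cs.take k ++ [cs[k]] := List.take_succ_eq_append_getElem h
      have hlen : s ≤ (cs.take k).length := by rw [List.length_take]; omega
      rw [htake, List.drop_append_of_le_length hlen]
      have happ : ((cs.take k).drop s ++ [cs[k]]).Nodup ↔
          ((cs.take k).drop s).Nodup ∧ cs[k] ∉ (cs.take k).drop s := by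
        simp [List.nodup_append]
        intro _
        constructor
        · intro hh hc; exact hh cs[k] hc rfl
        · intro hh a ha he; exact hh (he ▸ ha)
      rw [happ, ← minStart_le_iff, ← le_lastIdx_iff]
      constructor
      · rintro ⟨h1, h2⟩; exact ⟨h1, by omega⟩
      · rintro ⟨h1, h2⟩; exact ⟨h1, by omega⟩
    · have hdrop : (cs.take (k+1)).drop s = [] := by
        apply List.drop_eq_nil_of_le
        rw [List.length_take]; omega
      rw [hdrop]
      have h2 := minStart_le_self cs k
      simp only [List.nodup_nil, true_iff]
      exact ⟨by omega, by omega⟩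
  apply Nat.le_antisymm
  · apply Nat.find_min'
    rw [key]
    constructor
    · exact le_trans (Nat.le_max_left _ _) (le_refl _)
    · have : (lastIdx cs cs[k] k + 1).toNat ≤ max (minStart cs k) (lastIdx cs cs[k] k + 1).toNat :=
        Nat.le_max_right _ _
      omega
  · have hk2 := (key (minStart cs (k+1))).mp (minStart_spec cs (k+1))
    have := hk2.1
    have := hk2.2
    omega

theorem trigger_iff (cs : List Char) (k : Nat) (N : Nat) :
    ((N : Int) ≤ (k : Int) - (minStart cs k : Int)) ↔
      (N ≤ k ∧ ((cs.take k).drop (k - N)).Nodup) := by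
  have hle := minStart_le_self cs k
  have hiff := minStart_le_iff cs k (k - N)
  constructor
  · intro h
    refine ⟨by omega, hiff.mp (by omega)⟩
  · rintro ⟨h1, h2⟩
    have := hiff.mpr h2
    omega

theorem setlen_eq_iff (m : List Char) :
    (PySem.Set.ofList m).length = m.length ↔ m.Nodup := by
  constructor
  · intro h
    have h1 : (PySem.Set.ofList m).toFinset = m.toFinset := by
      ext x; simp [PySem.Set.mem_ofList]
    have h2 : (PySem.Set.ofList m).toFinset.card = (PySem.Set.ofList m).length :=
      List.toFinset_card_of_nodup (PySem.Set.nodup_ofList m)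
    have h3 : m.toFinset.card = m.dedup.length := List.card_toFinset m
    have h4 : m.dedup.length = m.length := by rw [← h3, ← h1, h2, h]
    have h5 : m.dedup = m := (List.dedup_sublist m).eq_of_length h4
    exact List.dedup_eq_self.mp h5
  · intro h
    rw [PySem.Set.ofList_eq_self_of_nodup m h]

theorem Acond_iff (cs : List Char) (k N : Nat) (hNk : N ≤ k) (hk : k < cs.length) :
    (((PySem.Set.ofList (PySem.List.slice cs (some ((k : Int) - (N : Int))) (some (k : Int)))).length : Int)
        = (N : Int)) ↔ ((cs.take k).drop (k - N)).Nodup := by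
  have hcast : (k : Int) - (N : Int) = ((k - N : Nat) : Int) := by omega
  rw [hcast, PySem.List.slice_natCast, ← List.drop_take]
  have hlen : ((cs.take k).drop (k - N)).length = N := by
    rw [List.length_drop, List.length_take]; omega
  rw [show ((N : Int) = ((cs.take k).drop (k - N)).length) by rw [hlen]]
  rw [Int.natCast_inj]
  exact setlen_eq_iff _

theorem scan_step (cs : List Char) (N : Nat) (j : Nat) (h : j < N) :
    scanSpec cs N j = scanSpec cs N (j+1) := by
  rw [scanSpec]
  split
  · rw [if_neg (by omega)]
  · rw [scanSpec, if_neg (by omega)]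

theorem scan_shift (cs : List Char) (N : Nat) : ∀ j, j ≤ N → scanSpec cs N j = scanSpec cs N N := by
  intro j hj
  induction hN : N - j generalizing j with
  | zero => have : j = N := by omega
            rw [this]
  | succ t ih =>
      rw [scan_step cs N j (by omega)]
      exact ih (j+1) (by omega) (by omega)

theorem A_eq_scan (cs : List Char) (N : Nat) :
    ∀ dfuel k, cs.length - k = dfuel → N ≤ k →
      solveRowA cs (N : Int) (PySem.List.pyRange (k : Int) (cs.length : Int) 1) = scanSpec cs N k := by
  intro dfuel
  induction dfuel with
  | zero =>
      intro k hd hk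
      rw [PySem.List.pyRange_one_eq_nil (by omega), scanSpec, if_neg (by omega)]
      rfl
  | succ t ih =>
      intro k hd hk
      have hklt : k < cs.length := by omega
      rw [PySem.List.pyRange_one_cons (by exact_mod_cast hklt)]
      rw [solveRowA]
      rw [scanSpec, if_pos hklt]
      by_cases hc : ((cs.take k).drop (k - N)).Nodup
      · rw [if_pos ((Acond_iff cs k N hk hklt).mpr hc),
            if_pos (show N ≤ k ∧ ((cs.take k).drop (k - N)).Nodup from ⟨hk, hc⟩)]
      · rw [if_neg (show ¬((PySem.Set.ofList (PySem.List.slice cs (some ((k:Int) - (N:Int))) (some (k:Int)))).length : Int) = (N:Int) from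
              by rw [Acond_iff cs k N hk hklt]; exact hc),
            if_neg (show ¬(N ≤ k ∧ ((cs.take k).drop (k - N)).Nodup) from fun hcon => hc hcon.2)]
        rw [show ((k : Int) + 1) = ((k + 1 : Nat) : Int) by push_cast; ring]
        exact ih (k+1) (by omega) (by omega)

theorem B_eq_scan (cs : List Char) (N : Nat) :
    ∀ (rest : List Char) (k : Nat) (last : PySem.Dict Char Int) (start : Int),
      rest = cs.drop k → k ≤ cs.length →
      start = (minStart cs k : Int) →
      (∀ c, last.getD c (-1) = lastIdx cs c k) →
      solveRowB (N : Int) rest last start (k : Int) = scanSpec cs N k := by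
  intro rest
  induction rest with
  | nil =>
      intro k last start hrest hk _ _
      have : cs.length ≤ k := by
        have := congrArg List.length hrest
        simp [List.length_drop] at this
        omega
      rw [scanSpec, if_neg (by omega)]
      rfl
  | cons c rest' ih =>
      intro k last start hrest hk hstart hlast
      have hklt : k < cs.length := by
        by_contra hge
        rw [List.drop_eq_nil_of_le (by omega)] at hrest
        simp at hrest
      have hdk := List.drop_eq_getElem_cons hklt
      rw [hdk] at hrest
      have hc : c = cs[k] := by injection hrest
      have hrest' : rest' = cs.drop (k+1) := by injection hrest
      rw [solveRowB]
      rw [scanSpec, if_pos hklt, hstart]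
      by_cases htr : (N : Int) ≤ (k : Int) - (minStart cs k : Int)
      · have hsc : N ≤ k ∧ ((cs.take k).drop (k - N)).Nodup := (trigger_iff cs k N).mp htr
        rw [if_pos htr, if_pos hsc]
      · have hsc : ¬(N ≤ k ∧ ((cs.take k).drop (k - N)).Nodup) := by
          rw [← trigger_iff cs k N]; exact htr
        rw [if_neg htr, if_neg hsc]
        have hms := minStart_succ cs k hklt
        have hlt := lastIdx_lt cs cs[k] k
        have hp : last.getD c (-1) = lastIdx cs cs[k] k := by rw [hlast, hc]
        rw [show ((k : Int) + 1) = ((k + 1 : Nat) : Int) by push_cast; ring]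
        apply ih (k+1) _ _ hrest' (by omega)
        · -- start invariant
          rw [hp, hms]
          by_cases hge : lastIdx cs cs[k] k ≥ (minStart cs k : Int)
          · rw [if_pos hge]
            push_cast
            omega
          · rw [if_neg hge]
            push_cast
            omega
        · -- dict invariant
          intro c'
          rw [PySem.Dict.getD_insert]
          rw [lastIdx]
          rw [List.getElem?_eq_getElem hklt]
          by_cases hcc : c' = cs[k]
          · rw [if_pos (by rw [hc]; exact hcc), if_pos (by rw [hcc])]
          · rw [if_neg (by rw [hc]; exact hcc), if_neg (by simp; intro hcontr; exact absurd hcontr.symm hcc), hlast]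

theorem A_neg (cs : List Char) (n : Int) (hn : n < 0) :
    ∀ is : List Int, solveRowA cs n is = 0 := by
  intro is
  induction is with
  | nil => rfl
  | cons i rest ih =>
      rw [solveRowA]
      rw [if_neg (by have := Int.natCast_nonneg (PySem.Set.ofList (PySem.List.slice cs (some (i - n)) (some i))).length; omega), ih]

theorem row_eq (cs : List Char) (n : Int) :
    solveRowA cs n (PySem.List.pyRange n (cs.length : Int) 1)
      = solveRowB n cs PySem.Dict.empty 0 0 := by
  by_cases hn : n ≤ 0
  · -- both sides are 0
    have hB : solveRowB n cs PySem.Dict.empty 0 0 = 0 := by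
      cases cs with
      | nil => rfl
      | cons c rest => rw [solveRowB, if_pos (by omega)]
    rw [hB]
    rcases lt_or_eq_of_le hn with hlt | heq
    · exact A_neg cs n hlt _
    · subst heq
      cases cs with
      | nil => rw [PySem.List.pyRange_one_eq_nil (by simp)]; rfl
      | cons c rest =>
          rw [PySem.List.pyRange_one_cons (by simp), solveRowA]
          rw [if_pos (by norm_num [PySem.List.slice_natCast])]
  · have hN : n = ((n.toNat : Nat) : Int) := by omega
    rw [hN]
    rw [A_eq_scan cs n.toNat (cs.length - n.toNat) n.toNat rfl (le_refl _)]
    rw [← scan_shift cs n.toNat 0 (by omega)]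
    symm
    rw [show (0 : Int) = ((0 : Nat) : Int) by norm_num]
    apply B_eq_scan cs n.toNat cs 0 PySem.Dict.empty _ (by simp) (by omega)
    · have : minStart cs 0 = 0 := Nat.le_zero.mp (minStart_le_self cs 0)
      rw [this]
    · intro c
      rw [lastIdx, PySem.Dict.getD_empty]

-- ===== VERDICT (by name: the statement is the Claim_ definition above) =====
theorem solve_spec : Claim_equal_solve := by
  intro d n _
  unfold Spec_solve solve solve_alt
  have hf : (fun (total : Int) (row : String) =>
      total + solveRowA row.toList n (PySem.List.pyRange n (PySem.Str.len row) 1))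
      = (fun (total : Int) (row : String) => total + solveRowB n row.toList PySem.Dict.empty 0 0) := by
    funext total row
    rw [PySem.Str.len_eq, row_eq]
  rw [hf]
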